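-- pv_equiv track=rewrite | github.com/bekirdag/ades | src/ades/packs/versioning.py | _diff_rules
-- ===== SOURCE A (Python) =====
-- def _diff_rules(
--     old_rules: list[dict[str, object]],
--     new_rules: list[dict[str, object]],
-- ) -> dict[str, list[str]]:
--     old_index = {_rule_key(item) for item in old_rules}
--     new_index = {_rule_key(item) for item in new_rules}
--     return {
--         "added": sorted(new_index - old_index),
--         "removed": sorted(old_index - new_index),
--     }
--
-- def _rule_key(item: dict[str, object]) -> str:
--     return (
--         f"{str(item.get('name') or '').casefold()}:"
--         f"{str(item.get('label') or '').casefold()}:"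
--         f"{str(item.get('pattern') or '')}"
--     )
-- ===== SOURCE B (Python) =====
-- def _rule_key(item):
--     return (
--         f"{str(item.get('name') or '').casefold()}:"
--         f"{str(item.get('label') or '').casefold()}:"
--         f"{str(item.get('pattern') or '')}"
--     )
--
--
-- def _diff_rules(old_rules, new_rules):
--     # One presence dict: key -> (seen-in-old, seen-in-new) flags.
--     flags = {}
--     for item in old_rules:
--         key = _rule_key(item)
--         flags[key] = (True, flags.get(key, (False, False))[1])
--     for item in new_rules:
--         key = _rule_key(item)
--         flags[key] = (flags.get(key, (False, False))[0], True)
--     added = []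
--     removed = []
--     for key, (in_old, in_new) in flags.items():
--         if in_new and not in_old:
--             added.append(key)
--         elif in_old and not in_new:
--             removed.append(key)
--     return {"added": sorted(added), "removed": sorted(removed)}
-- ===== Notes on version B (the rewrite author's own statement) =====
-- stated objective: alternative
-- what changed: Replaces A's two key-sets and two set-difference operations by one presence dict mapping each rule key to (in-old, in-new) flags, built in two passes and partitioned into added/removed in a single traversal of its items.
import Mathlib
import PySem

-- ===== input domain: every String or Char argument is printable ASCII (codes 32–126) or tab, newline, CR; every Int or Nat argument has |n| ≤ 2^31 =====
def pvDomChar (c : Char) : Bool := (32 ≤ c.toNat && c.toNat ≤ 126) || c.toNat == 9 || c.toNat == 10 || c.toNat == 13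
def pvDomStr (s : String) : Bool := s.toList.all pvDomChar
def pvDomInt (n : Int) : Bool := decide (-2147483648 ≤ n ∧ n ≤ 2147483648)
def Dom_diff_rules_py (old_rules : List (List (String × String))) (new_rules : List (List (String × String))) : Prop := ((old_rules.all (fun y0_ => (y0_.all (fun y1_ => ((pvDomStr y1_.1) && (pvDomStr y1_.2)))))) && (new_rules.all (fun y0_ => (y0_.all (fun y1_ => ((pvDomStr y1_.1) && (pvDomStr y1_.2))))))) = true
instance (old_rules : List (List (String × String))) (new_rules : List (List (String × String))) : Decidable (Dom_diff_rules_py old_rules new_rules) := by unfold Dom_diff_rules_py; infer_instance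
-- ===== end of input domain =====

-- B replaces A's two key-sets and two set differences by ONE presence dict (key -> (in-old, in-new)
-- flags) built in two passes and partitioned in a single traversal; objective: alternative decomposition.

-- ===== PORT A =====
-- shared helper: Python _rule_key (casefold ported as PySem.Str.lower — exact on the ASCII domain;
-- values are strings, so `str(v or '')` is the string itself, '' when missing or empty)
def ruleKey (item : List (String × String)) : String :=
  PySem.Str.lower ((item.lookup "name").getD "") ++ ":" ++
  PySem.Str.lower ((item.lookup "label").getD "") ++ ":" ++
  ((item.lookup "pattern").getD "")

def diff_rules_py (old_rules : List (List (String × String))) (new_rules : List (List (String × String))) : List (String × List String) :=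
  let old_index : PySem.Set String := PySem.Set.ofList (old_rules.map ruleKey)
  let new_index : PySem.Set String := PySem.Set.ofList (new_rules.map ruleKey)
  [("added", PySem.List.sorted (PySem.Set.diff new_index old_index) (fun x => x)),
   ("removed", PySem.List.sorted (PySem.Set.diff old_index new_index) (fun x => x))]

-- ===== PORT B =====
def diff_rules_py_alt (old_rules : List (List (String × String))) (new_rules : List (List (String × String))) : List (String × List String) :=
  let flags1 : PySem.Dict String (Bool × Bool) :=
    old_rules.foldl (fun d item =>
      let k := ruleKey item
      d.insert k (true, (d.getD k (false, false)).2)) PySem.Dict.empty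
  let flags : PySem.Dict String (Bool × Bool) :=
    new_rules.foldl (fun d item =>
      let k := ruleKey item
      d.insert k ((d.getD k (false, false)).1, true)) flags1
  let pr : List String × List String :=
    flags.items.foldl (fun acc p =>
      if p.2.2 && !p.2.1 then (acc.1 ++ [p.1], acc.2)
      else if p.2.1 && !p.2.2 then (acc.1, acc.2 ++ [p.1])
      else acc) ([], [])
  [("added", PySem.List.sorted pr.1 (fun x => x)),
   ("removed", PySem.List.sorted pr.2 (fun x => x))]

-- ===== PRECONDITION & SPEC =====
def Spec_diff_rules_py (old_rules : List (List (String × String))) (new_rules : List (List (String × String))) (out : List (String × List String)) : Prop := out = diff_rules_py_alt old_rules new_rules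
instance (old_rules : List (List (String × String))) (new_rules : List (List (String × String))) (out : List (String × List String)) : Decidable (Spec_diff_rules_py old_rules new_rules out) := by unfold Spec_diff_rules_py; infer_instance

-- ===== CLAIM (what is proved, stated in full; the proofs are below) =====
def Claim_equal_diff_rules_py : Prop := ∀ (old_rules : List (List (String × String))) (new_rules : List (List (String × String))), Dom_diff_rules_py old_rules new_rules → Spec_diff_rules_py old_rules new_rules (diff_rules_py old_rules new_rules)

-- ===== LEMMAS AND PROOFS =====

-- one pass of B's dict-building loops, abstracted over the flag-update function f
def pvStep (f : Bool × Bool → Bool × Bool) (d : PySem.Dict String (Bool × Bool)) (item : List (String × String)) : PySem.Dict String (Bool × Bool) :=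
  let k := ruleKey item
  d.insert k (f (d.getD k (false, false)))

theorem pvPass_keys_nodup (f : Bool × Bool → Bool × Bool) (l : List (List (String × String))) (d : PySem.Dict String (Bool × Bool)) (hd : d.keys.Nodup) :
    (l.foldl (pvStep f) d).keys.Nodup := by
  induction l generalizing d with
  | nil => exact hd
  | cons x xs ih => exact ih _ (PySem.Dict.nodup_keys_insert _ _ _ hd)

theorem pvPass_contains (f : Bool × Bool → Bool × Bool) (l : List (List (String × String))) (d : PySem.Dict String (Bool × Bool)) (k : String) :
    (l.foldl (pvStep f) d).contains k = (decide (k ∈ l.map ruleKey) || d.contains k) := by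
  induction l generalizing d with
  | nil => simp
  | cons x xs ih =>
      simp only [List.foldl_cons, ih, pvStep, PySem.Dict.contains_insert, List.map_cons,
        List.mem_cons]
      by_cases h : k = ruleKey x
      · simp [h]
      · have hb : (k == ruleKey x) = false := beq_eq_false_iff_ne.mpr h
        simp [h, hb]

theorem pvPass_getD (f : Bool × Bool → Bool × Bool) (hf : ∀ v, f (f v) = f v) (l : List (List (String × String))) (d : PySem.Dict String (Bool × Bool)) (k : String) :
    (l.foldl (pvStep f) d).getD k (false, false) =
      if k ∈ l.map ruleKey then f (d.getD k (false, false)) else d.getD k (false, false) := by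
  induction l generalizing d with
  | nil => simp
  | cons x xs ih =>
      simp only [List.foldl_cons, ih, pvStep, PySem.Dict.getD_insert, List.map_cons,
        List.mem_cons]
      by_cases hx : k = ruleKey x <;> by_cases hxs : k ∈ xs.map ruleKey <;>
        simp [hx, hxs, hf]

-- B's partition loop is a filter-and-project of the items list
theorem pvPartition (items : List (String × (Bool × Bool))) (acc : List String × List String) :
    items.foldl (fun acc p =>
      if p.2.2 && !p.2.1 then (acc.1 ++ [p.1], acc.2)
      else if p.2.1 && !p.2.2 then (acc.1, acc.2 ++ [p.1])
      else acc) acc =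
    (acc.1 ++ (items.filter (fun p => p.2.2 && !p.2.1)).map (·.1),
     acc.2 ++ (items.filter (fun p => p.2.1 && !p.2.2)).map (·.1)) := by
  induction items generalizing acc with
  | nil => simp
  | cons x xs ih =>
      obtain ⟨k, o, n⟩ := x
      cases o <;> cases n <;> (rw [List.foldl_cons, ih]; simp)

def pvF1 : Bool × Bool → Bool × Bool := fun v => (true, v.2)
def pvF2 : Bool × Bool → Bool × Bool := fun v => (v.1, true)

theorem pvFlags_getD (o n : List (List (String × String))) (k : String) :
    ((n.foldl (pvStep pvF2) (o.foldl (pvStep pvF1) PySem.Dict.empty)).getD k (false, false)) =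
      (decide (k ∈ o.map ruleKey), decide (k ∈ n.map ruleKey)) := by
  rw [pvPass_getD pvF2 (fun v => rfl), pvPass_getD pvF1 (fun v => rfl)]
  by_cases h1 : k ∈ o.map ruleKey <;> by_cases h2 : k ∈ n.map ruleKey <;>
    simp [h1, h2, pvF1, pvF2, PySem.Dict.getD_empty]

theorem pvFlags_contains (o n : List (List (String × String))) (k : String) :
    ((n.foldl (pvStep pvF2) (o.foldl (pvStep pvF1) PySem.Dict.empty)).contains k) =
      decide (k ∈ o.map ruleKey ∨ k ∈ n.map ruleKey) := by
  rw [pvPass_contains, pvPass_contains]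
  by_cases h1 : k ∈ o.map ruleKey <;> by_cases h2 : k ∈ n.map ruleKey <;>
    simp [h1, h2, PySem.Dict.contains_empty]

theorem pvFlags_nodup (o n : List (List (String × String))) :
    ((n.foldl (pvStep pvF2) (o.foldl (pvStep pvF1) PySem.Dict.empty)).keys.Nodup) :=
  pvPass_keys_nodup _ _ _ (pvPass_keys_nodup _ _ _ (by simp [PySem.Dict.keys_empty]))

theorem pvFlags_get? (o n : List (List (String × String))) (k : String) :
    ((n.foldl (pvStep pvF2) (o.foldl (pvStep pvF1) PySem.Dict.empty)).get? k) =
      if k ∈ o.map ruleKey ∨ k ∈ n.map ruleKey then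
        some (decide (k ∈ o.map ruleKey), decide (k ∈ n.map ruleKey))
      else none := by
  have hcont := pvFlags_contains o n k
  rw [PySem.Dict.contains_eq_isSome_get?] at hcont
  cases hg : ((n.foldl (pvStep pvF2) (o.foldl (pvStep pvF1) PySem.Dict.empty)).get? k) with
  | none =>
      rw [hg] at hcont
      rw [if_neg]
      exact fun h => absurd h (of_decide_eq_false hcont.symm)
  | some v =>
      have hv := PySem.Dict.getD_of_get?_eq_some _ (false, false) hg
      rw [pvFlags_getD] at hv
      rw [hg] at hcont
      simp only [Option.isSome_some] at hcont
      rw [if_pos (of_decide_eq_true hcont.symm), hv]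

theorem pvMem_part (o n : List (List (String × String))) (q : Bool × Bool → Bool) (k : String) :
    k ∈ (((n.foldl (pvStep pvF2) (o.foldl (pvStep pvF1) PySem.Dict.empty)).items.filter
          (fun p => q p.2)).map (·.1)) ↔
      ((k ∈ o.map ruleKey ∨ k ∈ n.map ruleKey) ∧
        q (decide (k ∈ o.map ruleKey), decide (k ∈ n.map ruleKey)) = true) := by
  constructor
  · intro hk
    obtain ⟨p, hp, rfl⟩ := List.mem_map.mp hk
    obtain ⟨pk, pv⟩ := p
    obtain ⟨hpi, hq⟩ := List.mem_filter.mp hp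
    have hg := (PySem.Dict.get?_eq_some_iff_mem_items _ _ _ (pvFlags_nodup o n)).mpr hpi
    rw [pvFlags_get?] at hg
    split at hg
    · rename_i hmem
      injection hg with hg
      subst hg
      exact ⟨hmem, hq⟩
    · cases hg
  · rintro ⟨hmem, hq⟩
    refine List.mem_map.mpr
      ⟨(k, (decide (k ∈ o.map ruleKey), decide (k ∈ n.map ruleKey))),
        List.mem_filter.mpr ⟨?_, hq⟩, rfl⟩
    exact (PySem.Dict.get?_eq_some_iff_mem_items _ _ _ (pvFlags_nodup o n)).mp
      (by rw [pvFlags_get?, if_pos hmem])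

theorem pvNodup_part (o n : List (List (String × String))) (q : Bool × Bool → Bool) :
    (((n.foldl (pvStep pvF2) (o.foldl (pvStep pvF1) PySem.Dict.empty)).items.filter
        (fun p => q p.2)).map (·.1)).Nodup := by
  have hk := pvFlags_nodup o n
  exact List.Sublist.nodup (List.Sublist.map _ List.filter_sublist) hk

theorem pvMem_diff (xs ys : List String) (k : String) :
    k ∈ PySem.Set.diff (PySem.Set.ofList xs) (PySem.Set.ofList ys) ↔ (k ∈ xs ∧ ¬ k ∈ ys) := by
  simp [PySem.Set.diff, List.mem_filter, PySem.Set.contains,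
    PySem.Set.mem_ofList]

theorem pvNodup_diff (xs ys : List String) :
    (PySem.Set.diff (PySem.Set.ofList xs) (PySem.Set.ofList ys)).Nodup :=
  (PySem.Set.nodup_ofList xs).filter _

theorem pvMain (o n : List (List (String × String))) :
    diff_rules_py o n = diff_rules_py_alt o n := by
  show _ =
    [("added", PySem.List.sorted
        (List.foldl
          (fun acc p =>
            if p.2.2 && !p.2.1 then (acc.1 ++ [p.1], acc.2)
            else if p.2.1 && !p.2.2 then (acc.1, acc.2 ++ [p.1])
            else acc)
          ([], [])
          (List.foldl (pvStep pvF2) (List.foldl (pvStep pvF1) PySem.Dict.empty o) n).items).1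
        (fun x => x)),
     ("removed", PySem.List.sorted
        (List.foldl
          (fun acc p =>
            if p.2.2 && !p.2.1 then (acc.1 ++ [p.1], acc.2)
            else if p.2.1 && !p.2.2 then (acc.1, acc.2 ++ [p.1])
            else acc)
          ([], [])
          (List.foldl (pvStep pvF2) (List.foldl (pvStep pvF1) PySem.Dict.empty o) n).items).2
        (fun x => x))]
  rw [pvPartition]
  simp only [List.nil_append]
  have hadd : PySem.List.sorted
      (PySem.Set.diff (PySem.Set.ofList (n.map ruleKey)) (PySem.Set.ofList (o.map ruleKey)))
      (fun x => x) =
    PySem.List.sorted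
      (((n.foldl (pvStep pvF2) (o.foldl (pvStep pvF1) PySem.Dict.empty)).items.filter
        (fun p => p.2.2 && !p.2.1)).map (·.1)) (fun x => x) := by
    refine PySem.List.sorted_eq_sorted_of_perm _ _ _ (fun a b h => h) ?_
    refine (List.perm_ext_iff_of_nodup (pvNodup_diff _ _) (pvNodup_part o n (fun v => v.2 && !v.1))).mpr ?_
    intro a
    rw [pvMem_diff, pvMem_part o n (fun v => v.2 && !v.1) a]
    by_cases h1 : a ∈ (o.map ruleKey) <;> by_cases h2 : a ∈ (n.map ruleKey) <;>
      simp [h1, h2]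
  have hrem : PySem.List.sorted
      (PySem.Set.diff (PySem.Set.ofList (o.map ruleKey)) (PySem.Set.ofList (n.map ruleKey)))
      (fun x => x) =
    PySem.List.sorted
      (((n.foldl (pvStep pvF2) (o.foldl (pvStep pvF1) PySem.Dict.empty)).items.filter
        (fun p => p.2.1 && !p.2.2)).map (·.1)) (fun x => x) := by
    refine PySem.List.sorted_eq_sorted_of_perm _ _ _ (fun a b h => h) ?_
    refine (List.perm_ext_iff_of_nodup (pvNodup_diff _ _) (pvNodup_part o n (fun v => v.1 && !v.2))).mpr ?_
    intro a
    rw [pvMem_diff, pvMem_part o n (fun v => v.1 && !v.2) a]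
    by_cases h1 : a ∈ (o.map ruleKey) <;> by_cases h2 : a ∈ (n.map ruleKey) <;>
      simp [h1, h2]
  rw [diff_rules_py, hadd, hrem]

theorem diff_rules_py_spec : Claim_equal_diff_rules_py := by
  intro o n _
  exact pvMain o n
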